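-- pv_equiv track=rewrite | github.com/0xbbuddha/Chess.com | C2_Profiles/chesscom/c2_code/base5_fen.py | string_to_fen
-- ===== SOURCE A (Python) =====
-- def string_to_fen(encoded: str) -> list[str]:
--     chunks = [encoded[i : i + 8] for i in range(0, len(encoded), 8)]
--     games: list[str] = []
--     fen_template = ["7k", "8", "8", "8", "8", "8", "8", "7K", " w - - 0 1"]
--     fen_data: list[str] = []
--     i = 0
--     for c in chunks:
--         if len(fen_data) < 6:
--             if i <= 2:
--                 fen_data.append(c.lower())
--             else:
--                 fen_data.append(c.upper())
--         else:
--             for idx, f in enumerate(fen_data):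
--                 if len(f) < 8:
--                     fen_data[idx] = f + str(8 - len(f))
--             games.append(
--                 [fen_template[0]] + fen_data + [fen_template[7], fen_template[8]]
--             )
--             fen_data = []
--             if c != "":
--                 fen_data.append(c.lower())
--                 i = 1
--                 continue
--             break
--         i += 1
--
--     if fen_data:
--         for idx, f in enumerate(fen_data):
--             if len(f) < 8:
--                 fen_data[idx] = f + str(8 - len(f))
--         games.append(
--             [fen_template[0]]
--             + fen_data
--             + (6 - len(fen_data)) * ["8"]
--             + [fen_template[7], fen_template[8]]
--         )
--     res: list[str] = []
--     for g in games:
--         res.append(str("/".join(g[0:8]) + str(g[8])))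
--     return res
-- ===== SOURCE B (Python) =====
-- def string_to_fen(encoded: str) -> list[str]:
--     chunks = [encoded[i : i + 8] for i in range(0, len(encoded), 8)]
--     res: list[str] = []
--     while chunks:
--         group, chunks = chunks[:6], chunks[6:]
--         rows = [c.lower() if j < 3 else c.upper() for j, c in enumerate(group)]
--         rows = [r + str(8 - len(r)) if len(r) < 8 else r for r in rows]
--         rows += ["8"] * (6 - len(rows))
--         res.append("/".join(["7k"] + rows + ["7K"]) + " w - - 0 1")
--     return res
-- ===== Notes on version B (the rewrite author's own statement) =====
-- stated objective: simpler
-- what changed: Replaces the flush-on-next-chunk state machine (mutable fen_data buffer, i counter, continue/break, separate trailing-flush block) with direct grouping: slice the chunk list six at a time and build each FEN row by its position in the group (0-2 lower, 3-5 upper), padding per row and filling short groups with '8'.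
import Mathlib
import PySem

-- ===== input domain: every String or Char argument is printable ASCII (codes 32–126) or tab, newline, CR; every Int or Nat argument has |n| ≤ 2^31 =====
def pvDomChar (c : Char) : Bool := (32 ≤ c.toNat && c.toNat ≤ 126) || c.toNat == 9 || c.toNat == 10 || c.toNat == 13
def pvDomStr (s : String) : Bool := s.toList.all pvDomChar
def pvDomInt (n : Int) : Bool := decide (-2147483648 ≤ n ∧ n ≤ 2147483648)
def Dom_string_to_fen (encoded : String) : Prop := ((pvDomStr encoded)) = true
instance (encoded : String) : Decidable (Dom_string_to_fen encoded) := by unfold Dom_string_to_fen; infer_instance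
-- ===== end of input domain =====

-- B replaces A's flush-on-next-chunk state machine with direct grouping of the
-- chunk list six at a time (objective: simpler; not faster).

-- ===== PORT A =====

-- helper for A's inline padding loop `for idx, f in enumerate(fen_data): if len(f) < 8: fen_data[idx] = f + str(8-len(f))`
-- (the enumerate/assignment loop is exactly an elementwise map)
def pvPadA (f : String) : String :=
  if PySem.Str.len f < 8 then f ++ PySem.Int.toStr (8 - PySem.Str.len f) else f

def pvFenTemplate : List String := ["7k", "8", "8", "8", "8", "8", "8", "7K", " w - - 0 1"]

-- A's `for c in chunks` loop; state = (games, fen_data, i); `break` returns immediately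
def pvLoopA : List String → List (List String) → List String → Int →
    List (List String) × List String
  | [], games, fd, _ => (games, fd)
  | c :: cs, games, fd, i =>
    if PySem.List.len fd < 6 then
      if i ≤ 2 then pvLoopA cs games (fd ++ [PySem.Str.lower c]) (i + 1)
      else pvLoopA cs games (fd ++ [PySem.Str.upper c]) (i + 1)
    else
      let fd' := fd.map pvPadA
      let games' := games ++ [[PySem.List.pyGetD pvFenTemplate 0 ""] ++ fd' ++
        [PySem.List.pyGetD pvFenTemplate 7 "", PySem.List.pyGetD pvFenTemplate 8 ""]]
      if c ≠ "" then pvLoopA cs games' [PySem.Str.lower c] 1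
      else (games', [])

def string_to_fen (encoded : String) : List String :=
  let chunks := (PySem.List.pyRange 0 (PySem.Str.len encoded) 8).map
      (fun i => PySem.Str.slice encoded (some i) (some (i + 8)))
  let r := pvLoopA chunks [] [] 0
  -- trailing `if fen_data:` flush; `(6 - len(fen_data)) * ["8"]` is List.replicate
  -- (exact: Python's list-mult with a non-positive count is [], as is replicate's Nat subtraction)
  let games := if r.2 ≠ [] then
      r.1 ++ [[PySem.List.pyGetD pvFenTemplate 0 ""] ++ r.2.map pvPadA ++
        List.replicate (6 - r.2.length) "8" ++
        [PySem.List.pyGetD pvFenTemplate 7 "", PySem.List.pyGetD pvFenTemplate 8 ""]]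
    else r.1
  -- `res.append(str("/".join(g[0:8]) + str(g[8])))`; g always has 9 entries so g[8]
  -- never raises and pyGetD is exact; str() on a str is the identity
  games.map (fun g => PySem.Str.join "/" (PySem.List.slice g (some 0) (some 8)) ++
    PySem.List.pyGetD g 8 "")

-- ===== PORT B =====

-- helper for B's pad comprehension `r + str(8 - len(r)) if len(r) < 8 else r`
def pvPadB (r : String) : String :=
  if PySem.Str.len r < 8 then r ++ PySem.Int.toStr (8 - PySem.Str.len r) else r

-- one game from one group of ≤ 6 chunks (B's loop body)
def pvGameB (group : List String) : String :=
  let rows1 := (PySem.List.enumerate group).map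
      (fun jc => if jc.1 < 3 then PySem.Str.lower jc.2 else PySem.Str.upper jc.2)
  let rows2 := rows1.map pvPadB
  let rows := rows2 ++ List.replicate (6 - rows2.length) "8"
  PySem.Str.join "/" (["7k"] ++ rows ++ ["7K"]) ++ " w - - 0 1"

-- B's `while chunks:` loop; chunks[:6] / chunks[6:] are take 6 / drop 6
-- (exact for non-negative literal bounds: PySem.List.slice_to_natCast / slice_from_natCast)
def pvGroupsB : List String → List String
  | [] => []
  | c :: cs => pvGameB ((c :: cs).take 6) :: pvGroupsB ((c :: cs).drop 6)
  termination_by l => l.length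
  decreasing_by simp

def string_to_fen_alt (encoded : String) : List String :=
  pvGroupsB ((PySem.List.pyRange 0 (PySem.Str.len encoded) 8).map
      (fun i => PySem.Str.slice encoded (some i) (some (i + 8))))

-- ===== PRECONDITION & SPEC =====
def Spec_string_to_fen (encoded : String) (out : List String) : Prop := out = string_to_fen_alt encoded
instance (encoded : String) (out : List String) : Decidable (Spec_string_to_fen encoded out) := by unfold Spec_string_to_fen; infer_instance

-- ===== CLAIM (what is proved, stated in full; the proofs are below) =====
def Claim_equal_string_to_fen : Prop := ∀ (encoded : String), Dom_string_to_fen encoded → Spec_string_to_fen encoded (string_to_fen encoded)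

-- ===== LEMMAS AND PROOFS =====

-- proof-only abbreviations: row casing by position, the final FEN line of one game,
-- the per-game string of A's last loop, A's loop recast without the games accumulator
-- and the counter i (which always equals fen_data's length), and A's post-processing
def pvCase (k : Nat) (c : String) : String :=
  if k ≤ 2 then PySem.Str.lower c else PySem.Str.upper c

def pvCaseFrom (k : Nat) : List String → List String
  | [] => []
  | c :: t => pvCase k c :: pvCaseFrom (k + 1) t

def pvFinal (fd : List String) : List String :=
  ["7k"] ++ fd.map pvPadA ++ List.replicate (6 - fd.length) "8" ++ ["7K", " w - - 0 1"]

def pvGameStr (g : List String) : String :=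
  PySem.Str.join "/" (PySem.List.slice g (some 0) (some 8)) ++ PySem.List.pyGetD g 8 ""

def pvPref : List String → List String → List String
  | fd, [] => if fd = [] then [] else [pvGameStr (pvFinal fd)]
  | fd, c :: cs =>
    if fd.length < 6 then pvPref (fd ++ [pvCase fd.length c]) cs
    else pvGameStr (pvFinal fd) :: pvPref [PySem.Str.lower c] cs

def pvPost (r : List (List String) × List String) : List String :=
  (if r.2 ≠ [] then
      r.1 ++ [[PySem.List.pyGetD pvFenTemplate 0 ""] ++ r.2.map pvPadA ++
        List.replicate (6 - r.2.length) "8" ++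
        [PySem.List.pyGetD pvFenTemplate 7 "", PySem.List.pyGetD pvFenTemplate 8 ""]]
    else r.1).map pvGameStr

theorem pvLoopA_eq_pref (cs : List String) (games : List (List String)) (fd : List String)
    (hne : ∀ c ∈ cs, c ≠ "") (hlen : fd.length ≤ 6) :
    pvPost (pvLoopA cs games fd (fd.length : Int)) = games.map pvGameStr ++ pvPref fd cs := by
  have hT0 : PySem.List.pyGetD pvFenTemplate 0 "" = "7k" := rfl
  have hT7 : PySem.List.pyGetD pvFenTemplate 7 "" = "7K" := rfl
  have hT8 : PySem.List.pyGetD pvFenTemplate 8 "" = " w - - 0 1" := rfl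
  induction cs generalizing games fd with
  | nil =>
    by_cases hfd : fd = []
    · simp [pvLoopA, pvPost, pvPref, hfd]
    · rw [show pvLoopA [] games fd (fd.length : Int) = (games, fd) from rfl]
      rw [pvPost, if_pos (by simpa using hfd)]
      rw [show pvPref fd [] = [pvGameStr (pvFinal fd)] by simp [pvPref, hfd]]
      simp [pvFinal, hT0, hT7, hT8]
  | cons c cs ih =>
    rw [show pvLoopA (c :: cs) games fd (fd.length : Int)
        = if PySem.List.len fd < 6 then
            if (fd.length : Int) ≤ 2 then pvLoopA cs games (fd ++ [PySem.Str.lower c]) ((fd.length : Int) + 1)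
            else pvLoopA cs games (fd ++ [PySem.Str.upper c]) ((fd.length : Int) + 1)
          else
            if c ≠ "" then pvLoopA cs (games ++ [[PySem.List.pyGetD pvFenTemplate 0 ""] ++ fd.map pvPadA ++
                [PySem.List.pyGetD pvFenTemplate 7 "", PySem.List.pyGetD pvFenTemplate 8 ""]]) [PySem.Str.lower c] 1
            else (games ++ [[PySem.List.pyGetD pvFenTemplate 0 ""] ++ fd.map pvPadA ++
                [PySem.List.pyGetD pvFenTemplate 7 "", PySem.List.pyGetD pvFenTemplate 8 ""]], [])
      from rfl]
    rw [PySem.List.len_eq]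
    by_cases h : fd.length < 6
    · rw [if_pos (by exact_mod_cast h)]
      rw [show pvPref fd (c :: cs) = pvPref (fd ++ [pvCase fd.length c]) cs by simp [pvPref, h]]
      by_cases h2 : fd.length ≤ 2
      · rw [if_pos (by exact_mod_cast h2)]
        rw [show pvCase fd.length c = PySem.Str.lower c by simp [pvCase, h2]]
        rw [show (fd.length : Int) + 1 = ((fd ++ [PySem.Str.lower c]).length : Int) by simp]
        exact ih games _ (fun x hx => hne x (List.mem_cons_of_mem _ hx)) (by simp; omega)
      · rw [if_neg (by omega)]
        rw [show pvCase fd.length c = PySem.Str.upper c by simp [pvCase, h2]]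
        rw [show (fd.length : Int) + 1 = ((fd ++ [PySem.Str.upper c]).length : Int) by simp]
        exact ih games _ (fun x hx => hne x (List.mem_cons_of_mem _ hx)) (by simp; omega)
    · have h6 : fd.length = 6 := by omega
      rw [if_neg (by omega)]
      rw [if_pos (hne c (List.mem_cons_self))]
      rw [show (1 : Int) = (([PySem.Str.lower c] : List String).length : Int) by simp]
      rw [ih _ [PySem.Str.lower c] (fun x hx => hne x (List.mem_cons_of_mem _ hx)) (by simp)]
      rw [show [PySem.List.pyGetD pvFenTemplate 0 ""] ++ fd.map pvPadA ++
          [PySem.List.pyGetD pvFenTemplate 7 "", PySem.List.pyGetD pvFenTemplate 8 ""]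
          = pvFinal fd by simp [pvFinal, hT0, hT7, hT8, h6]]
      rw [show pvPref fd (c :: cs) = pvGameStr (pvFinal fd) :: pvPref [PySem.Str.lower c] cs by
        simp [pvPref, h]]
      simp

theorem pvEnumerate_case (group : List String) (k : Nat) :
    (PySem.List.enumerate group (k : Int)).map
      (fun jc => if jc.1 < 3 then PySem.Str.lower jc.2 else PySem.Str.upper jc.2)
    = pvCaseFrom k group := by
  induction group generalizing k with
  | nil => rfl
  | cons c t ih =>
    rw [PySem.List.enumerate_cons]
    have h1 : (k : Int) + 1 = ((k + 1 : Nat) : Int) := by push_cast; ring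
    simp only [List.map_cons, h1, ih, pvCaseFrom, pvCase]
    congr 1
    by_cases h : k ≤ 2 <;> simp [h] <;> omega
theorem pvCaseFrom_length (k : Nat) (l : List String) : (pvCaseFrom k l).length = l.length := by
  induction l generalizing k with
  | nil => rfl
  | cons c t ih => simp [pvCaseFrom, ih]
theorem pvGameStr_mid (M : List String) (t : String) (hM : M.length = 6) :
    pvGameStr (["7k"] ++ M ++ ["7K", t])
    = PySem.Str.join "/" (["7k"] ++ M ++ ["7K"]) ++ t := by
  match M, hM with
  | [a,b,c,d,e,f], _ => rfl

theorem pvGameB_eq (group : List String) (h : group.length ≤ 6) :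
    pvGameB group = pvGameStr (pvFinal (pvCaseFrom 0 group)) := by
  unfold pvGameB
  have e0 : (PySem.List.enumerate group).map
      (fun jc => if jc.1 < 3 then PySem.Str.lower jc.2 else PySem.Str.upper jc.2)
    = pvCaseFrom 0 group := by
    have := pvEnumerate_case group 0
    simpa using this
  rw [e0]
  have hAB : pvPadB = pvPadA := rfl
  rw [hAB]
  set R := pvCaseFrom 0 group with hR
  have hRlen : R.length = group.length := pvCaseFrom_length 0 group
  set M := R.map pvPadA ++ List.replicate (6 - (R.map pvPadA).length) "8" with hM
  have hMlen : M.length = 6 := by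
    simp [hM, hRlen]; omega
  have hfin : pvFinal R = ["7k"] ++ M ++ ["7K", " w - - 0 1"] := by
    simp [pvFinal, hM, List.append_assoc]
  rw [hfin, pvGameStr_mid M _ hMlen]

theorem pvPref_eq_groups (cs : List String) (fd : List String) (hlen : fd.length ≤ 6) :
    pvPref fd cs
    = if fd = [] ∧ cs = [] then []
      else pvGameStr (pvFinal (fd ++ pvCaseFrom fd.length (cs.take (6 - fd.length))))
        :: pvGroupsB (cs.drop (6 - fd.length)) := by
  induction cs generalizing fd with
  | nil =>
    by_cases hfd : fd = [] <;> simp [pvPref, hfd, pvCaseFrom, pvGroupsB]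
  | cons c cs ih =>
    by_cases h : fd.length < 6
    · have h6 : 6 - fd.length = (5 - fd.length) + 1 := by omega
      rw [show pvPref fd (c :: cs) = pvPref (fd ++ [pvCase fd.length c]) cs by
        simp [pvPref, h]]
      rw [ih (fd ++ [pvCase fd.length c]) (by simp; omega)]
      have hne : fd ++ [pvCase fd.length c] ≠ [] := by simp
      simp only [hne, false_and, List.cons_ne_nil, and_false]
      rw [if_neg (by simp)]
      have hlen' : (fd ++ [pvCase fd.length c]).length = fd.length + 1 := by simp
      rw [hlen']
      have h6' : 6 - (fd.length + 1) = 5 - fd.length := by omega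
      rw [h6', h6]
      simp only [List.take_succ_cons, List.drop_succ_cons, pvCaseFrom, List.append_assoc,
        List.cons_append, List.nil_append]
      simp
    · have h6 : fd.length = 6 := by omega
      rw [show pvPref fd (c :: cs) = pvGameStr (pvFinal fd) :: pvPref [PySem.Str.lower c] cs by
        simp [pvPref, h]]
      rw [ih [PySem.Str.lower c] (by simp)]
      have hfd : fd ≠ [] := by intro hh; rw [hh] at h6; simp at h6
      rw [if_neg (by simp)]
      rw [h6]
      simp only [show 6 - 6 = 0 from rfl, List.take_zero, List.drop_zero, pvCaseFrom,
        List.append_nil]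
      rw [pvGroupsB]
      rw [pvGameB_eq _ (by simp)]
      rw [show (c :: cs).take 6 = c :: cs.take 5 from rfl,
        show (c :: cs).drop 6 = cs.drop 5 from rfl]
      rw [show pvCaseFrom 0 (c :: cs.take 5) = pvCase 0 c :: pvCaseFrom 1 (cs.take 5) from rfl]
      rw [show pvCase 0 c = PySem.Str.lower c by simp [pvCase]]
      simp [hfd]

theorem pvChunks_ne (encoded : String) :
    ∀ c ∈ (PySem.List.pyRange 0 (PySem.Str.len encoded) 8).map
      (fun i => PySem.Str.slice encoded (some i) (some (i + 8))), c ≠ "" := by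
  intro c hc
  simp only [List.mem_map] at hc
  obtain ⟨i, hi, rfl⟩ := hc
  rw [PySem.List.mem_pyRange_iff_of_pos (by norm_num)] at hi
  rw [PySem.Str.len_eq] at hi
  have h0 : (0:Int) ≤ i := hi.1
  have hlt : i < (encoded.toList.length : Int) := hi.2.1
  intro hemp
  have : (PySem.Str.slice encoded (some i) (some (i + 8))).toList = [] := by
    rw [hemp]; rfl
  rw [PySem.Str.toList_slice, PySem.Chars.slice_eq_listSlice,
    PySem.List.slice_toNat encoded.toList h0 (show (0:Int) ≤ i+8 by omega)] at this
  have h8 : (i + 8).toNat - i.toNat = 8 := by omega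
  rw [h8] at this
  rcases List.take_eq_nil_iff.mp this with h | h
  · omega
  · rw [List.drop_eq_nil_iff] at h; omega

-- ===== VERDICT (by name: the statement is the Claim_ definition above) =====
theorem string_to_fen_spec : Claim_equal_string_to_fen := by
  intro encoded _
  unfold Spec_string_to_fen string_to_fen string_to_fen_alt
  set chunks := (PySem.List.pyRange 0 (PySem.Str.len encoded) 8).map
      (fun i => PySem.Str.slice encoded (some i) (some (i + 8))) with hchunks
  show pvPost (pvLoopA chunks [] [] 0) = pvGroupsB chunks
  rw [show (0 : Int) = (([] : List String).length : Int) from rfl]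
  rw [pvLoopA_eq_pref chunks [] [] (pvChunks_ne encoded) (by simp)]
  rw [pvPref_eq_groups chunks [] (by simp)]
  cases chunks with
  | nil => simp [pvGroupsB]
  | cons c cs =>
    rw [if_neg (by simp)]
    rw [pvGroupsB]
    rw [pvGameB_eq _ (by simp)]
    simp
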